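-- pv_equiv track=rewrite | github.com/thetocha/python_practice | lab2.py | reorganisation
-- ===== SOURCE A (Python) =====
-- def reorganisation(matrix, x):
--     index = 0
--     lower = []
--     greater = []
--     for i, elem in enumerate(matrix):
--         if abs(elem) < abs(x):
--             lower.append(elem)
--         else:
--             greater.append(elem)
--     matrix = lower + greater
--     return matrix
-- ===== SOURCE B (Python) =====
-- def reorganisation(matrix, x):
--     # Stable sort on a boolean key: elements with abs(elem) < abs(x) keep the
--     # False key and come first in original order, the rest follow in order.
--     return sorted(matrix, key=lambda e: abs(e) >= abs(x))
-- ===== Notes on version B (the rewrite author's own statement) =====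
-- stated objective: idiomatic
-- what changed: Replaced the explicit two-accumulator partition loop with a single stable sort on the boolean key abs(e) >= abs(x), whose stability reproduces the lower+greater concatenation.
import Mathlib
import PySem

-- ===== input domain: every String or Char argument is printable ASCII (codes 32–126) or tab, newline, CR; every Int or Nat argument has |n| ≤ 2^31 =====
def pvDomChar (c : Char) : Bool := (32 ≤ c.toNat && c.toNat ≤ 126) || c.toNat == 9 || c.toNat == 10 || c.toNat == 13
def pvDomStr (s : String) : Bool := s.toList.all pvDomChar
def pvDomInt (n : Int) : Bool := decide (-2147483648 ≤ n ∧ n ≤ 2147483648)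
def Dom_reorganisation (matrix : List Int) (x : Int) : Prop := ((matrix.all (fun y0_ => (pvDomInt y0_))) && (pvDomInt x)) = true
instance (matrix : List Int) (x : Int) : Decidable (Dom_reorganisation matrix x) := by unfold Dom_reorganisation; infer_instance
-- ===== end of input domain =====

-- B replaces A's two-accumulator partition loop by one stable sort on the boolean
-- key abs(e) >= abs(x) (idiomatic; not claimed faster).

-- ===== PORT A =====
-- for i, elem in enumerate(matrix): append to lower / greater; return lower + greater
def reorganisation (matrix : List Int) (x : Int) : List Int :=
  -- index = 0 is dead code in A and dropped
  let p : List Int × List Int :=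
    (PySem.List.enumerate matrix 0).foldl
      (fun (s : List Int × List Int) ie =>
        if |ie.2| < |x| then (s.1 ++ [ie.2], s.2) else (s.1, s.2 ++ [ie.2]))
      ([], [])
  p.1 ++ p.2

-- ===== PORT B =====
-- return sorted(matrix, key=lambda e: abs(e) >= abs(x))
def reorganisation_alt (matrix : List Int) (x : Int) : List Int :=
  PySem.List.sorted matrix (fun e => decide (|x| ≤ |e|)) false

-- ===== PRECONDITION & SPEC =====
def Spec_reorganisation (matrix : List Int) (x : Int) (out : List Int) : Prop := out = reorganisation_alt matrix x
instance (matrix : List Int) (x : Int) (out : List Int) : Decidable (Spec_reorganisation matrix x out) := by unfold Spec_reorganisation; infer_instance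

-- ===== CLAIM (what is proved, stated in full; the proofs are below) =====
def Claim_equal_reorganisation : Prop := ∀ (matrix : List Int) (x : Int), Dom_reorganisation matrix x → Spec_reorganisation matrix x (reorganisation matrix x)

-- ===== LEMMAS AND PROOFS =====

-- inserting a false-key element goes right after the false-key prefix
theorem insertBy_bool_false {α : Type} (k : α → Bool) (z : α) (l g : List α)
    (hz : k z = false) (hl : ∀ y ∈ l, k y = false) (hg : ∀ y ∈ g, k y = true) :
    PySem.List.insertBy (fun a b => decide (k a < k b)) z (l ++ g) = l ++ z :: g := by
  induction l with
  | nil =>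
    cases g with
    | nil => rfl
    | cons w ws =>
      simp only [List.nil_append, PySem.List.insertBy]
      have : k w = true := hg w (by simp)
      rw [hz, this]
      simp
  | cons y ys ih =>
    have hy : k y = false := hl y (by simp)
    simp only [List.cons_append, PySem.List.insertBy]
    rw [hz, hy]
    simp only [show ¬(false < false) from by decide, decide_false, if_neg Bool.false_ne_true]
    rw [ih (fun a ha => hl a (by simp [ha]))]

-- inserting a true-key element goes to the end
theorem insertBy_bool_true {α : Type} (k : α → Bool) (z : α) (ys : List α)
    (hz : k z = true) :
    PySem.List.insertBy (fun a b => decide (k a < k b)) z ys = ys ++ [z] := by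
  apply PySem.List.insertBy_of_forall_not_before
  intro y _
  rw [hz]
  simp

-- the insertion-sort fold on a two-valued key keeps the (false-group ++ true-group) shape
theorem foldl_insertBy_bool {α : Type} (k : α → Bool) :
    ∀ (xs l g : List α), (∀ y ∈ l, k y = false) → (∀ y ∈ g, k y = true) →
    xs.foldl (fun acc z => PySem.List.insertBy (fun a b => decide (k a < k b)) z acc) (l ++ g)
      = (l ++ xs.filter (fun y => !k y)) ++ (g ++ xs.filter k) := by
  intro xs
  induction xs with
  | nil => intro l g _ _; simp
  | cons z zs ih =>
    intro l g hl hg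
    simp only [List.foldl_cons]
    cases hz : k z with
    | true =>
      rw [insertBy_bool_true k z (l ++ g) hz]
      have : l ++ g ++ [z] = l ++ (g ++ [z]) := by simp
      rw [this, ih l (g ++ [z]) hl (by intro y hy; rcases List.mem_append.mp hy with h | h
                                       · exact hg y h
                                       · simp at h; simp [h, hz])]
      simp [hz]
    | false =>
      rw [insertBy_bool_false k z l g hz hl hg]
      have : l ++ z :: g = (l ++ [z]) ++ g := by simp
      rw [this, ih (l ++ [z]) g (by intro y hy; rcases List.mem_append.mp hy with h | h
                                    · exact hl y h
                                    · simp at h; simp [h, hz]) hg]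
      simp [hz]

-- B's sort is the filter/filter concatenation
theorem alt_eq_filters (matrix : List Int) (x : Int) :
    reorganisation_alt matrix x
      = matrix.filter (fun y => !decide (|x| ≤ |y|)) ++ matrix.filter (fun y => decide (|x| ≤ |y|)) := by
  unfold reorganisation_alt PySem.List.sorted
  simp only [if_neg (by decide : ¬ (false = true))]
  have := foldl_insertBy_bool (fun e : Int => decide (|x| ≤ |e|)) matrix [] []
    (by intro y h; simp at h) (by intro y h; simp at h)
  simpa using this

-- A's fold over enumerate accumulates the two filters
theorem a_fold_eq (x : Int) :
    ∀ (ms : List Int) (n : Int) (l g : List Int),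
    (PySem.List.enumerate ms n).foldl
        (fun (s : List Int × List Int) ie =>
          if |ie.2| < |x| then (s.1 ++ [ie.2], s.2) else (s.1, s.2 ++ [ie.2])) (l, g)
      = (l ++ ms.filter (fun y => decide (|y| < |x|)), g ++ ms.filter (fun y => !decide (|y| < |x|))) := by
  intro ms
  induction ms with
  | nil => intro n l g; simp [PySem.List.enumerate_nil]
  | cons m ms ih =>
    intro n l g
    rw [PySem.List.enumerate_cons]
    simp only [List.foldl_cons]
    by_cases hm : |m| < |x|
    · rw [if_pos hm, ih (n + 1) (l ++ [m]) g]
      simp [hm]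
    · rw [if_neg hm, ih (n + 1) l (g ++ [m])]
      simp [hm]

-- ===== VERDICT (by name: the statement is the Claim_ definition above) =====
theorem reorganisation_spec : Claim_equal_reorganisation := by
  intro matrix x _
  unfold Spec_reorganisation reorganisation
  rw [alt_eq_filters]
  simp only [a_fold_eq x matrix 0 [] []]
  have hkey : ∀ y : Int, (!decide (|x| ≤ |y|)) = decide (|y| < |x|) := by
    intro y; by_cases h : |x| ≤ |y| <;> simp [h] <;> omega
  have hkey2 : ∀ y : Int, (!decide (|y| < |x|)) = decide (|x| ≤ |y|) := by
    intro y; by_cases h : |y| < |x| <;> simp [h] <;> omega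
  simp only [List.filter_congr (fun y _ => hkey y), List.filter_congr (fun y _ => hkey2 y), List.nil_append]
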